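-- pv_equiv track=rewrite | github.com/avalanchesiqi/twitter-sampling | wrangling/merge_subcrawlers.py | find_next_item
-- ===== SOURCE A (Python) =====
-- def find_next_item(nextline_list):
--     end_flag = all(v.rstrip() == '' for v in nextline_list)
--     if end_flag:
--         return None, None, True
--     else:
--         lst = []
--         for item in nextline_list:
--             if item.rstrip() == '':
--                 lst.append('END')
--             else:
--                 lst.append(item)
--         index_min = min(range(len(lst)), key=lst.__getitem__)
--         return index_min, lst[index_min], False
-- ===== SOURCE B (Python) =====
-- def find_next_item(nextline_list):
--     best_index = None
--     best_value = None
--     all_empty = True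
--     for i, item in enumerate(nextline_list):
--         if item.rstrip() == '':
--             effective = 'END'
--         else:
--             effective = item
--             all_empty = False
--         if best_value is None or effective < best_value:
--             best_index = i
--             best_value = effective
--     if all_empty:
--         return None, None, True
--     return best_index, best_value, False
-- ===== Notes on version B (the rewrite author's own statement) =====
-- stated objective: alternative
-- what changed: A's three passes (all()-emptiness check, building an 'END'-substituted copy of the list, then min over range(len) with __getitem__ as key) are fused into one enumerate loop that keeps a running first-minimum (index, effective value) updated only on strict <, plus an all_empty flag.
import Mathlib
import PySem

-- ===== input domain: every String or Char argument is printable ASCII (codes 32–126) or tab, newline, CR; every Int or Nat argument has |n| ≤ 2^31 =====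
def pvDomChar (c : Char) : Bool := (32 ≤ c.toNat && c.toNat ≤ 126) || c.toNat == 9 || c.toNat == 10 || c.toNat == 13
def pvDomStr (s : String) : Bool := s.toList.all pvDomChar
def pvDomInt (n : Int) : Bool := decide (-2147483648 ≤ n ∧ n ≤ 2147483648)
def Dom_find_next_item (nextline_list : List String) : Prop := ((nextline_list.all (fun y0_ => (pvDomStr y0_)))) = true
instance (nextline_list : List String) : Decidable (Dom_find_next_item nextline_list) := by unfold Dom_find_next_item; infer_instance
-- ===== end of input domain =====

-- B replaces A's three passes (all-empty check, building the 'END'-substituted list, min over range)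
-- by a single enumerate loop maintaining the running first-minimum and an all_empty flag (objective: alternative).

-- ===== PORT A =====
def find_next_item (nextline_list : List String) : Option Int × Option String × Bool :=
  let end_flag := nextline_list.all (fun v => PySem.Str.rstrip v == "")
  if end_flag then (none, none, true)
  else
    let lst := nextline_list.foldl
      (fun acc item => if PySem.Str.rstrip item == "" then acc ++ ["END"] else acc ++ [item]) []
    -- min(range(len(lst)), key=lst.__getitem__): every index is in range, so the getD default is never read
    match PySem.List.min? (PySem.List.pyRange 0 (PySem.List.len lst)) (fun i => PySem.List.pyGetD lst i "") with
    | some index_min => (some index_min, some (PySem.List.pyGetD lst index_min ""), false)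
    | none => (none, none, true)   -- unreachable: lst is nonempty in this branch

-- ===== PORT B =====
def altStep (st : Option (Int × String) × Bool) (p : Int × String) : Option (Int × String) × Bool :=
  -- (effective, all_empty) for this iteration
  let eb : String × Bool := if PySem.Str.rstrip p.2 == "" then ("END", st.2) else (p.2, false)
  match st.1 with
  | none => (some (p.1, eb.1), eb.2)
  | some (bi, bv) => if eb.1 < bv then (some (p.1, eb.1), eb.2) else (some (bi, bv), eb.2)

def find_next_item_alt (nextline_list : List String) : Option Int × Option String × Bool :=
  let r := (PySem.List.enumerate nextline_list).foldl altStep (none, true)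
  if r.2 then (none, none, true)
  else
    match r.1 with
    | some (bi, bv) => (some bi, some bv, false)
    | none => (none, none, false)   -- unreachable: the best is set as soon as any line is seen

-- ===== PRECONDITION & SPEC =====
def Spec_find_next_item (nextline_list : List String) (out : Option Int × Option String × Bool) : Prop := out = find_next_item_alt nextline_list
instance (nextline_list : List String) (out : Option Int × Option String × Bool) : Decidable (Spec_find_next_item nextline_list out) := by unfold Spec_find_next_item; infer_instance

-- ===== CLAIM (what is proved, stated in full; the proofs are below) =====
def Claim_equal_find_next_item : Prop := ∀ (nextline_list : List String), Dom_find_next_item nextline_list → Spec_find_next_item nextline_list (find_next_item nextline_list)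

-- ===== LEMMAS AND PROOFS =====

/-- effective value of a line: 'END' for a blank line, else the line itself. -/
def effS (s : String) : String := if PySem.Str.rstrip s == "" then "END" else s

/-- the best-so-far half of `altStep`. -/
def bestStep (o : Option (Int × String)) (p : Int × String) : Option (Int × String) :=
  match o with
  | none => some (p.1, effS p.2)
  | some (bi, bv) => if effS p.2 < bv then some (p.1, effS p.2) else some (bi, bv)

/-- the all_empty half of `altStep`. -/
def emptyStep (b : Bool) (p : Int × String) : Bool :=
  if PySem.Str.rstrip p.2 == "" then b else false

lemma altStep_eq (st : Option (Int × String) × Bool) (p : Int × String) :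
    altStep st p = (bestStep st.1 p, emptyStep st.2 p) := by
  obtain ⟨o, b⟩ := st
  by_cases h : PySem.Str.rstrip p.2 == "" <;>
    cases o <;> simp [altStep, bestStep, emptyStep, effS, h] <;> try (split <;> rfl)

lemma foldl_altStep (es : List (Int × String)) :
    ∀ (o : Option (Int × String)) (b : Bool),
      es.foldl altStep (o, b) = (es.foldl bestStep o, es.foldl emptyStep b) := by
  induction es with
  | nil => intro o b; rfl
  | cons p t ih => intro o b; simp only [List.foldl_cons, altStep_eq]; exact ih _ _

lemma foldl_emptyStep (xs : List String) :
    ∀ (k : Int) (b : Bool),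
      (PySem.List.enumerate xs k).foldl emptyStep b
        = (b && xs.all (fun v => PySem.Str.rstrip v == "")) := by
  induction xs with
  | nil => intro k b; simp [PySem.List.enumerate_nil]
  | cons x t ih =>
    intro k b
    by_cases h : PySem.Str.rstrip x == "" <;>
      simp [PySem.List.enumerate_cons, emptyStep, h, ih]

/-- the step of B's running minimum, with the effective value read through a key. -/
def keyStep (key : Int → String) (acc : Option (Int × String)) (j : Int) : Option (Int × String) :=
  match acc with
  | none => some (j, key j)
  | some (bi, bv) => if key j < bv then some (j, key j) else some (bi, bv)

/-- the step of `min?`'s first-minimum fold. -/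
def minStep (key : Int → String) (acc : Option Int) (x : Int) : Option Int :=
  match acc with
  | none => some x
  | some m => if key x < key m then some x else some m

lemma min?_eq_foldl_minStep (L : List Int) (key : Int → String) :
    PySem.List.min? L key = L.foldl (minStep key) none := by
  unfold PySem.List.min?
  apply PySem.List.foldl_congr_mem
  intro acc x _
  cases acc <;> rfl

/-- the keyed best-so-far fold computes the map of `min?`'s first-minimum fold. -/
lemma bestFold_eq_minFold (L : List Int) (key : Int → String) :
    ∀ (o : Option Int),
      L.foldl (keyStep key) (o.map (fun i => (i, key i)))
      = (L.foldl (minStep key) o).map (fun i => (i, key i)) := by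
  induction L with
  | nil => intro o; rfl
  | cons j t ih =>
    intro o
    cases o with
    | none => exact ih (some j)
    | some m =>
      simp only [List.foldl_cons, Option.map_some, keyStep, minStep]
      by_cases h : key j < key m <;> simp only [h, if_pos, if_false]
      · exact ih (some j)
      · exact ih (some m)

lemma lst_eq_map (xs : List String) :
    xs.foldl (fun acc item => if PySem.Str.rstrip item == "" then acc ++ ["END"] else acc ++ [item]) []
      = xs.map effS := by
  have h : (fun (acc : List String) item =>
      if PySem.Str.rstrip item == "" then acc ++ ["END"] else acc ++ [item])
      = (fun acc item => acc ++ [effS item]) := by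
    funext acc item
    by_cases h : PySem.Str.rstrip item == "" <;> simp [effS, h]
  rw [h, PySem.List.foldl_append_singleton_eq_map]
  rfl

/-- on an in-range index, the key A reads off the substituted list is the
    effective value of the raw line B computes. -/
lemma bestStep_key (xs : List String) (acc : Option (Int × String)) (j : Int)
    (hj : j ∈ PySem.List.pyRange 0 (xs.length : Int)) :
    bestStep acc (j, PySem.List.pyGetD xs j "")
      = keyStep (fun i => PySem.List.pyGetD (xs.map effS) i "") acc j := by
  rcases PySem.List.mem_pyRange_one.mp hj with ⟨h0, h1⟩
  have hk : PySem.List.pyGetD (xs.map effS) j "" = effS (PySem.List.pyGetD xs j "") := by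
    rw [PySem.List.pyGetD_eq_getElem _ "" h0 (by simpa using h1),
        PySem.List.pyGetD_eq_getElem _ "" h0 h1]
    simp
  cases acc <;> simp [bestStep, keyStep, hk]

-- ===== VERDICT (by name: the statement is the Claim_ definition above) =====
theorem find_next_item_spec : Claim_equal_find_next_item := by
  intro xs _
  unfold Spec_find_next_item find_next_item find_next_item_alt
  rw [PySem.List.enumerate_eq_map_pyRange xs "", List.foldl_map, lst_eq_map]
  simp only [PySem.List.len_eq, List.length_map]
  have hsplit :
      (PySem.List.pyRange 0 (xs.length : Int)).foldl
          (fun acc j => altStep acc (j, PySem.List.pyGetD xs j "")) (none, true)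
        = ((PySem.List.pyRange 0 (xs.length : Int)).foldl
              (fun acc j => bestStep acc (j, PySem.List.pyGetD xs j "")) none,
           (PySem.List.pyRange 0 (xs.length : Int)).foldl
              (fun b j => emptyStep b (j, PySem.List.pyGetD xs j "")) true) := by
    have := foldl_altStep ((PySem.List.pyRange 0 (xs.length : Int)).map
        (fun j => (j, PySem.List.pyGetD xs j ""))) none true
    simpa [List.foldl_map] using this
  have hempty :
      (PySem.List.pyRange 0 (xs.length : Int)).foldl
          (fun b j => emptyStep b (j, PySem.List.pyGetD xs j "")) true
        = xs.all (fun v => PySem.Str.rstrip v == "") := by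
    have := foldl_emptyStep xs 0 true
    rw [PySem.List.enumerate_eq_map_pyRange xs "", List.foldl_map,
        PySem.List.len_eq] at this
    simpa using this
  by_cases hall : xs.all (fun v => PySem.Str.rstrip v == "") = true
  · simp [hall, hsplit, hempty]
  · -- some line is non-empty
    have hbest :
        (PySem.List.pyRange 0 (xs.length : Int)).foldl
            (fun acc j => bestStep acc (j, PySem.List.pyGetD xs j "")) none
          = (PySem.List.min? (PySem.List.pyRange 0 (xs.length : Int))
              (fun i => PySem.List.pyGetD (xs.map effS) i "")).map
              (fun i => (i, PySem.List.pyGetD (xs.map effS) i "")) := by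
      rw [PySem.List.foldl_congr_mem _ _ _ none (fun acc j hj => bestStep_key xs acc j hj),
          min?_eq_foldl_minStep]
      simpa using bestFold_eq_minFold (PySem.List.pyRange 0 (xs.length : Int))
        (fun i => PySem.List.pyGetD (xs.map effS) i "") none
    have hne : xs ≠ [] := by
      intro h; subst h; simp at hall
    obtain ⟨m, hm⟩ : ∃ m, PySem.List.min? (PySem.List.pyRange 0 (xs.length : Int))
        (fun i => PySem.List.pyGetD (xs.map effS) i "") = some m := by
      cases hmin : PySem.List.min? (PySem.List.pyRange 0 (xs.length : Int))
          (fun i => PySem.List.pyGetD (xs.map effS) i "") with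
      | none =>
        exfalso
        have h := (PySem.List.min?_eq_none_iff _ _).mp hmin
        have := congrArg List.length h
        rw [PySem.List.length_pyRange_one] at this
        simp at this
        exact hne (by cases xs with | nil => rfl | cons a t => simp at this)
      | some m => exact ⟨m, rfl⟩
    simp [hall, hsplit, hempty, hbest, hm]
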